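-- pv_equiv track=rewrite | github.com/rn2407stanford/Python-Codes | crypto.py | compute_slug
-- ===== SOURCE A (Python) =====
-- ALPHABET = ['a', 'b', 'c', 'd', 'e', 'f', 'g', 'h', 'i', 'j', 'k', 'l', 'm', 'n', 'o', 'p', 'q', 'r', 's', 't', 'u', 'v', 'w', 'x', 'y', 'z']
--
-- def compute_slug(key):
--     """
--     Given a key string, compute and return the len-26 slug list for it.
--     >>> compute_slug('z')
--     ['z', 'a', 'b', 'c', 'd', 'e', 'f', 'g', 'h', 'i', 'j', 'k', 'l', 'm', 'n', 'o', 'p', 'q', 'r', 's', 't', 'u', 'v', 'w', 'x', 'y']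
--     >>> compute_slug('Bananas!')
--     ['b', 'a', 'n', 's', 'c', 'd', 'e', 'f', 'g', 'h', 'i', 'j', 'k', 'l', 'm', 'o', 'p', 'q', 'r', 't', 'u', 'v', 'w', 'x', 'y', 'z']
--     >>> compute_slug('Life, Liberty, and')
--     ['l', 'i', 'f', 'e', 'b', 'r', 't', 'y', 'a', 'n', 'd', 'c', 'g', 'h', 'j', 'k', 'm', 'o', 'p', 'q', 's', 'u', 'v', 'w', 'x', 'z']
--     >>> compute_slug('Zounds!')
--     ['z', 'o', 'u', 'n', 'd', 's', 'a', 'b', 'c', 'e', 'f', 'g', 'h', 'i', 'j', 'k', 'l', 'm', 'p', 'q', 'r', 't', 'v', 'w', 'x', 'y']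
--     """
--     lst = []
--     for ch in key:
--         if ch.lower() not in lst:
--             if ch.isalpha():
--                 lst.append(ch.lower())
--
--     for ch in ALPHABET:
--         if ch not in lst:
--             lst.append(ch)
--     return lst
-- ===== SOURCE B (Python) =====
-- ALPHABET = ['a', 'b', 'c', 'd', 'e', 'f', 'g', 'h', 'i', 'j', 'k', 'l', 'm', 'n', 'o', 'p', 'q', 'r', 's', 't', 'u', 'v', 'w', 'x', 'y', 'z']
--
-- def compute_slug(key):
--     # Rank-and-sort: give every alphabet letter a numeric rank -- its first
--     # occurrence index in the key if it appears there (as a letter), otherwise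
--     # len(key) + its code point -- and return the alphabet sorted by that rank.
--     first = {}
--     for i, ch in enumerate(key):
--         if ch.isalpha():
--             first.setdefault(ch.lower(), i)
--     n = len(key)
--     return sorted(ALPHABET, key=lambda c: first.get(c, n + ord(c)))
-- ===== Notes on version B (the rewrite author's own statement) =====
-- stated objective: alternative
-- what changed: B replaces A's two append loops (dedup the key's lowered letters, then scan the alphabet for missing ones) by a rank-and-sort algorithm: one pass records each letter's first-occurrence index in a dict, then the 26 alphabet letters are sorted by that index, absent letters ranking after all present ones by code point.
import Mathlib
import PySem

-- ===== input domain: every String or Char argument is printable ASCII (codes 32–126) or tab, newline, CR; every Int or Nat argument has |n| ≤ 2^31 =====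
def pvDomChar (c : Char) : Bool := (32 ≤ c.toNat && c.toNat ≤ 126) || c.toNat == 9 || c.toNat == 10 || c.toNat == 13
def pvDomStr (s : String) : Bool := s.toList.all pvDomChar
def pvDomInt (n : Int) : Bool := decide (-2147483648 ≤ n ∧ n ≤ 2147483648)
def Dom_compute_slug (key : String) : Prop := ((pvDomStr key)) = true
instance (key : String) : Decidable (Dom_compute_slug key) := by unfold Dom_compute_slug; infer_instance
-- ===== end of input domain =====

-- B replaces A's two append loops by a rank-and-sort algorithm: each alphabet letter gets a
-- numeric rank (first occurrence index in the key, else len(key)+code point) and the alphabet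
-- is sorted by that rank (alternative algorithm, not measured faster); returns agree on Dom.

def pvALPHABET : List String :=
  ["a","b","c","d","e","f","g","h","i","j","k","l","m","n","o","p","q","r","s","t","u","v","w","x","y","z"]

-- ch.lower() for a single character ch, as the one-character string Python compares/stores
def pvLow (ch : Char) : String := String.ofList (PySem.Chars.lower [ch])

-- ===== PORT A =====
def compute_slug (key : String) : List String :=
  let lst := key.toList.foldl (fun lst ch =>
    if pvLow ch ∉ lst then
      if PySem.Chars.isalpha ch then lst ++ [pvLow ch] else lst
    else lst) []
  pvALPHABET.foldl (fun lst ch => if ch ∉ lst then lst ++ [ch] else lst) lst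

-- ===== PORT B =====
-- ord(c) on a one-character string c is the code point of its single character (exact).
def compute_slug_alt (key : String) : List String :=
  let first := (PySem.List.enumerate key.toList).foldl
    (fun d (p : Int × Char) =>
      if PySem.Chars.isalpha p.2 then PySem.Dict.setdefault d (pvLow p.2) p.1 else d)
    PySem.Dict.empty
  let n : Int := (key.toList.length : Int)
  PySem.List.sorted pvALPHABET
    (fun c => PySem.Dict.getD first c (n + ((c.toList.headD ' ').toNat : Int))) false

-- ===== PRECONDITION & SPEC =====
def Spec_compute_slug (key : String) (out : List String) : Prop := out = compute_slug_alt key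
instance (key : String) (out : List String) : Decidable (Spec_compute_slug key out) := by unfold Spec_compute_slug; infer_instance

-- ===== CLAIM (what is proved, stated in full; the proofs are below) =====
def Claim_equal_compute_slug : Prop := ∀ (key : String), Dom_compute_slug key → Spec_compute_slug key (compute_slug key)

-- ===== LEMMAS AND PROOFS =====

-- Char order transfers to code points.
theorem pv_char_le_toNat {a b : Char} (h : a ≤ b) : a.toNat ≤ b.toNat := by
  rw [Char.le_def, UInt32.le_iff_toNat_le] at h; exact h

-- Every one-character string over 'a'..'z' is an element of the alphabet list.
theorem pv_mem_of_range (c : Char) (h1 : 97 ≤ c.toNat) (h2 : c.toNat ≤ 122) :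
    String.ofList [c] ∈ pvALPHABET := by
  have hc : c = Char.ofNat c.toNat := (Char.ofNat_toNat c).symm
  rw [hc]
  interval_cases h : c.toNat <;> decide

-- The lowering of any alphabetic character is in the alphabet list.
theorem pv_low_mem (ch : Char) (h : PySem.Chars.isalpha ch = true) : pvLow ch ∈ pvALPHABET := by
  simp only [PySem.Chars.isalpha, PySem.Chars.isupper, PySem.Chars.islower, Bool.or_eq_true,
    Bool.and_eq_true, decide_eq_true_eq] at h
  simp only [pvLow, PySem.Chars.lower, List.map, PySem.Chars.lowerChar, PySem.Chars.isupper]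
  have eA : ('A').toNat = 65 := rfl
  have eZ : ('Z').toNat = 90 := rfl
  have ea : ('a').toNat = 97 := rfl
  have ez : ('z').toNat = 122 := rfl
  rcases h with ⟨h1, h2⟩ | ⟨h1, h2⟩
  · have k1 := pv_char_le_toNat h1
    have k2 := pv_char_le_toNat h2
    rw [if_pos (by simp only [Bool.and_eq_true, decide_eq_true_eq]; exact ⟨h1, h2⟩)]
    have hv : (Char.ofNat (ch.toNat + 32)).toNat = ch.toNat + 32 := by
      rw [Char.toNat_ofNat, if_pos]; exact Or.inl (by omega)
    exact pv_mem_of_range _ (by omega) (by omega)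
  · have k1 := pv_char_le_toNat h1
    have k2 := pv_char_le_toNat h2
    have hup : (decide ('A' ≤ ch) && decide (ch ≤ 'Z')) = false := by
      simp only [Bool.and_eq_false_iff, decide_eq_false_iff_not]
      right; intro hZ; have := pv_char_le_toNat hZ; omega
    rw [if_neg (by simp [hup])]
    exact pv_mem_of_range _ (by omega) (by omega)

-- A's first-loop body is Set.add of the lowered character, applied only to alphabetic characters.
theorem pv_stepA (lst : List String) (ch : Char) :
    (if pvLow ch ∉ lst then
      if PySem.Chars.isalpha ch then lst ++ [pvLow ch] else lst
     else lst)
    = if PySem.Chars.isalpha ch then PySem.Set.add lst (pvLow ch) else lst := by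
  rw [PySem.Set.add_eq_ite]
  split_ifs <;> rfl

-- A's first loop computes the set (ordered dedup) of the lowered alphabetic characters.
theorem pv_loop1 (cs : List Char) :
    cs.foldl (fun lst ch =>
      if pvLow ch ∉ lst then
        if PySem.Chars.isalpha ch then lst ++ [pvLow ch] else lst
      else lst) []
    = PySem.Set.ofList ((cs.filter (fun c => PySem.Chars.isalpha c)).map pvLow) := by
  have h : (fun (lst : List String) (ch : Char) =>
      if pvLow ch ∉ lst then
        if PySem.Chars.isalpha ch then lst ++ [pvLow ch] else lst
      else lst)
      = fun lst ch => if PySem.Chars.isalpha ch then PySem.Set.add lst (pvLow ch) else lst := by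
    funext lst ch; exact pv_stepA lst ch
  rw [h, PySem.List.foldl_if_eq_foldl_filter, ← PySem.Set.update_map_eq_foldl_add,
      PySem.Set.update_nil_left]

-- A's second loop appends the not-yet-seen alphabet letters in alphabet order.
theorem pv_loop2 (lst : List String) :
    pvALPHABET.foldl (fun lst ch => if ch ∉ lst then lst ++ [ch] else lst) lst
    = lst ++ pvALPHABET.filter (fun y => !PySem.Set.contains lst y) := by
  have hbody : (fun (l : List String) (ch : String) => if ch ∉ l then l ++ [ch] else l)
      = fun l ch => PySem.Set.add l ch := by
    funext l ch; rw [PySem.Set.add_eq_ite]; split_ifs <;> rfl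
  rw [hbody]
  have : pvALPHABET.foldl PySem.Set.add lst = PySem.Set.update lst pvALPHABET := rfl
  rw [this, PySem.Set.update_eq_append_filter]
  have hAlph : PySem.Set.ofList pvALPHABET = pvALPHABET := by decide
  rw [hAlph]


-- The items B's dict loop appends after the already-seen keys of d.
def pvNew : List Char → Int → List String → List (String × Int)
  | [], _, _ => []
  | ch :: t, s, seen =>
    if PySem.Chars.isalpha ch = true ∧ pvLow ch ∉ seen then
      (pvLow ch, s) :: pvNew t (s + 1) (seen ++ [pvLow ch])
    else pvNew t (s + 1) seen

-- B's dict loop appends exactly pvNew to the accumulator's items.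
theorem pv_items (cs : List Char) : ∀ (s : Int) (d : PySem.Dict String Int), d.keys.Nodup →
    ((PySem.List.enumerate cs s).foldl
      (fun d (p : Int × Char) =>
        if PySem.Chars.isalpha p.2 then PySem.Dict.setdefault d (pvLow p.2) p.1 else d) d).items
    = d.items ++ pvNew cs s d.keys := by
  induction cs with
  | nil => intro s d _; simp [pvNew, PySem.List.enumerate_nil]
  | cons ch t ih =>
    intro s d hnd
    rw [PySem.List.enumerate_cons, List.foldl_cons]
    by_cases ha : PySem.Chars.isalpha ch = true
    · by_cases hc : d.contains (pvLow ch) = true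
      · have hmem : pvLow ch ∈ d.keys := (PySem.Dict.contains_iff_mem_keys d _).mp hc
        simp only [ha, if_pos, PySem.Dict.setdefault_of_contains d _ hc]
        rw [ih (s + 1) d hnd, pvNew, if_neg (by simp [hmem])]
      · have hc' : d.contains (pvLow ch) = false := by simpa using hc
        have hmem : pvLow ch ∉ d.keys := fun hm =>
          hc ((PySem.Dict.contains_iff_mem_keys d _).mpr hm)
        simp only [ha, if_pos, PySem.Dict.setdefault_of_not_contains d _ hc']
        rw [ih (s + 1) _ (by
          exact PySem.Dict.nodup_keys_insert d _ _ hnd)]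
        rw [PySem.Dict.items_insert_of_not_contains d _ hc',
            PySem.Dict.keys_insert_of_not_contains d _ hc']
        rw [pvNew, if_pos ⟨ha, hmem⟩, List.append_assoc]
        rfl
    · simp only [ha, Bool.false_eq_true, if_false]
      rw [ih (s + 1) d hnd, pvNew, if_neg (by simp [ha])]

-- The keys pvNew appends complete seen to the ordered dedup of the lowered letters.
theorem pv_new_fst (cs : List Char) : ∀ (s : Int) (seen : List String),
    seen ++ (pvNew cs s seen).map (·.1)
    = PySem.Set.update seen ((cs.filter (fun c => PySem.Chars.isalpha c)).map pvLow) := by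
  induction cs with
  | nil => intro s seen; simp [pvNew, PySem.Set.update]
  | cons ch t ih =>
    intro s seen
    by_cases ha : PySem.Chars.isalpha ch = true
    · have hupd : PySem.Set.update seen ((List.filter (fun c => PySem.Chars.isalpha c) (ch :: t)).map pvLow)
          = PySem.Set.update (PySem.Set.add seen (pvLow ch)) ((t.filter (fun c => PySem.Chars.isalpha c)).map pvLow) := by
        simp [ha, PySem.Set.update]
      by_cases hm : pvLow ch ∈ seen
      · rw [pvNew, if_neg (by simp [hm]), hupd, PySem.Set.add_of_mem hm, ih]
      · rw [pvNew, if_pos ⟨ha, hm⟩, hupd, PySem.Set.add_of_not_mem hm]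
        have := ih (s + 1) (seen ++ [pvLow ch])
        simpa using this
    · rw [pvNew, if_neg (by simp [ha])]
      have hupd : PySem.Set.update seen ((List.filter (fun c => PySem.Chars.isalpha c) (ch :: t)).map pvLow)
          = PySem.Set.update seen ((t.filter (fun c => PySem.Chars.isalpha c)).map pvLow) := by
        simp [ha]
      rw [hupd, ih]

-- pvNew's stored indices are strictly increasing and lie in [s, s + length cs).
theorem pv_new_vals (cs : List Char) : ∀ (s : Int) (seen : List String),
    (pvNew cs s seen).Pairwise (fun p q => p.2 < q.2)
    ∧ ∀ p ∈ pvNew cs s seen, s ≤ p.2 ∧ p.2 < s + cs.length := by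
  induction cs with
  | nil => intro s seen; simp [pvNew]
  | cons ch t ih =>
    intro s seen
    rw [pvNew]
    split_ifs with h
    · obtain ⟨hp, hb⟩ := ih (s + 1) (seen ++ [pvLow ch])
      refine ⟨List.Pairwise.cons (fun q hq => ?_) hp, ?_⟩
      · have := (hb q hq).1; show s < q.2; omega
      · intro p hp'
        rcases List.mem_cons.mp hp' with rfl | hp'
        · refine ⟨le_refl _, ?_⟩
          show s < s + ((ch :: t).length : Int)
          simp only [List.length_cons]; push_cast; omega
        · have := hb p hp'; simp at this ⊢; omega
    · obtain ⟨hp, hb⟩ := ih (s + 1) seen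
      refine ⟨hp, fun p hp' => ?_⟩
      have := hb p hp'; simp at this ⊢; omega

-- ===== VERDICT (by name: the statement is the Claim_ definition above) =====
theorem compute_slug_spec : Claim_equal_compute_slug := by
  intro key _
  show compute_slug key = compute_slug_alt key
  simp only [compute_slug, compute_slug_alt]
  rw [pv_loop1, pv_loop2]
  set cs := key.toList with hcs
  set pre := PySem.Set.ofList ((cs.filter (fun c => PySem.Chars.isalpha c)).map pvLow) with hpre
  set tail := pvALPHABET.filter (fun y => !PySem.Set.contains pre y) with htail
  -- B's dict
  set d := (PySem.List.enumerate cs 0).foldl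
    (fun d (p : Int × Char) =>
      if PySem.Chars.isalpha p.2 then PySem.Dict.setdefault d (pvLow p.2) p.1 else d)
    PySem.Dict.empty with hd
  have hitems : d.items = pvNew cs 0 [] := by
    rw [hd, pv_items cs 0 PySem.Dict.empty (by simp [PySem.Dict.empty, PySem.Dict.keys])]
    rfl
  have hkeys : d.keys = pre := by
    have := pv_new_fst cs 0 []
    simp only [List.nil_append, PySem.Set.update_nil_left] at this
    rw [PySem.Dict.keys, hitems, this, hpre]
  have hknd : d.keys.Nodup := by rw [hkeys]; exact PySem.Set.nodup_ofList _
  -- facts about pre and tail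
  have hprend : pre.Nodup := PySem.Set.nodup_ofList _
  have hAnd : pvALPHABET.Nodup := by decide
  have hpre_sub : ∀ x ∈ pre, x ∈ pvALPHABET := by
    intro x hx
    rw [hpre] at hx
    rcases List.mem_map.mp ((PySem.Set.mem_ofList _ _).mp hx) with ⟨c, hc, rfl⟩
    exact pv_low_mem c (by simpa using (List.mem_filter.mp hc).2)
  have htail_not : ∀ y ∈ tail, y ∉ pre := by
    intro y hy
    have := (List.mem_filter.mp (htail ▸ hy)).2
    simpa using this
  -- the rank function
  set rank := fun c : String => PySem.Dict.getD d c ((cs.length : Int) + ((c.toList.headD ' ').toNat : Int)) with hrank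
  -- rank of a pre element is its stored index; rank of a tail element is the default
  have hrank_pre : ∀ p ∈ d.items, rank p.1 = p.2 := by
    intro p hp
    exact PySem.Dict.getD_of_mem_items d (by exact (Prod.mk.eta ▸ hp)) hknd _
  have hrank_tail : ∀ y, y ∉ pre → rank y = (cs.length : Int) + ((y.toList.headD ' ').toNat : Int) := by
    intro y hy
    apply PySem.Dict.getD_of_not_contains
    rw [PySem.Dict.contains_eq_decide_mem_keys, hkeys]
    simpa using hy
  obtain ⟨hvals_pair, hvals_bound⟩ := pv_new_vals cs 0 []
  rw [← hitems] at hvals_pair hvals_bound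
  -- A's result is a strictly rank-increasing permutation of the alphabet
  apply Eq.symm
  apply PySem.List.sorted_eq_of_perm_of_pairwise_lt
  · -- permutation
    have htnd : tail.Nodup := hAnd.filter _
    rw [List.perm_ext_iff_of_nodup (List.Nodup.append hprend htnd
      (fun x hx hx' => htail_not x hx' hx)) hAnd]
    intro a
    constructor
    · intro ha
      rcases List.mem_append.mp ha with h | h
      · exact hpre_sub a h
      · exact List.mem_of_mem_filter (htail ▸ h)
    · intro ha
      by_cases hp : a ∈ pre
      · exact List.mem_append.mpr (Or.inl hp)
      · refine List.mem_append.mpr (Or.inr ?_)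
        rw [htail]
        exact List.mem_filter.mpr ⟨ha, by simpa using hp⟩
  · -- strictly increasing rank
    rw [List.pairwise_append]
    refine ⟨?_, ?_, ?_⟩
    · -- within pre: stored indices, strictly increasing
      have hpre_map : pre = d.items.map (·.1) := by rw [← hkeys]; rfl
      rw [hpre_map, List.pairwise_map]
      exact (hvals_pair.imp_of_mem (fun {p q} hp hq hlt => by
        rw [hrank_pre p hp, hrank_pre q hq]; exact hlt))
    · -- within tail: default ranks, strictly increasing code points
      have hAp : pvALPHABET.Pairwise
          (fun a b : String => ((a.toList.headD ' ').toNat : Int) < ((b.toList.headD ' ').toNat : Int)) := by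
        decide
      have := hAp.sublist
        (List.filter_sublist (p := fun y => !PySem.Set.contains pre y) (l := pvALPHABET))
      rw [← htail] at this
      exact this.imp_of_mem (fun {a b} ha hb hlt => by
        rw [hrank_tail a (htail_not a ha), hrank_tail b (htail_not b hb)]
        omega)
    · -- across: every pre rank < every tail rank
      intro a ha b hb
      have hmem : a ∈ d.keys := by rw [hkeys]; exact ha
      rcases List.mem_map.mp hmem with ⟨p, hp, rfl⟩
      rw [hrank_pre p hp, hrank_tail b (htail_not b hb)]
      have := (hvals_bound p hp).2
      have hnn : (0 : Int) ≤ ((b.toList.headD ' ').toNat : Int) := Int.natCast_nonneg _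
      omega
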